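-- pv_equiv track=rewrite | github.com/RawIron/hackerrank | python-skills/no_idea.py | solve
-- ===== SOURCE A (Python) =====
-- def solve(numbers, m, like, dislike):
--     like = dict(zip(like, [1]*m))
--     dislike = dict(zip(dislike, [-1]*m))
--     weights = like.copy()
--     weights.update(dislike)
--
--     total = 0
--     for number in numbers:
--         if number in weights:
--             total += weights[number]
--
--     return total
-- ===== SOURCE B (Python) =====
-- def solve(numbers, m, like, dislike):
--     counts = {}
--     for n in numbers:
--         counts[n] = counts.get(n, 0) + 1
--     likes = {x for x, _ in zip(like, range(m))}
--     dislikes = {x for x, _ in zip(dislike, range(m))}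
--     total = 0
--     for x in dislikes:
--         total -= counts.get(x, 0)
--     for x in likes:
--         if x not in dislikes:
--             total += counts.get(x, 0)
--     return total
-- ===== Notes on version B (the rewrite author's own statement) =====
-- stated objective: alternative
-- what changed: B builds a frequency count of `numbers` once and iterates over the deduplicated sets of the first m like/dislike ids (subtracting counts over dislikes, adding counts over likes not disliked), instead of A's scan of `numbers` against a merged +1/-1 weight dict.
import Mathlib
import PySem

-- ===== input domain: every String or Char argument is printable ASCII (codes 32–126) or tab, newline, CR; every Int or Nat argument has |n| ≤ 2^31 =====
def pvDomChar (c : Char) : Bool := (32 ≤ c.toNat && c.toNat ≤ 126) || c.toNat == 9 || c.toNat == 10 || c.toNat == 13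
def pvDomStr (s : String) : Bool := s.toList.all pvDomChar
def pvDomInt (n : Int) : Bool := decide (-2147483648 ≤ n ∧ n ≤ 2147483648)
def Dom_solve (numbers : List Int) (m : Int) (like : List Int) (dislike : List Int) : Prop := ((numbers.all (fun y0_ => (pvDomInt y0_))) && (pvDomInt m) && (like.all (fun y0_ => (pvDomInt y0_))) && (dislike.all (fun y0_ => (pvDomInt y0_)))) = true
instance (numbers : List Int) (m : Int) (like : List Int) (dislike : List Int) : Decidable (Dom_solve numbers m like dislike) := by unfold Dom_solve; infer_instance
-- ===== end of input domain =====

-- B re-implements A by iterating over the deduplicated sets of the first m preference ids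
-- with a frequency count of `numbers`, instead of scanning `numbers` against a merged ±1
-- weight dict; objective: alternative decomposition, same result.

-- ===== PORT A =====
def solve (numbers : List Int) (m : Int) (like : List Int) (dislike : List Int) : Int :=
  let like2 : PySem.Dict Int Int := PySem.Dict.ofList (like.zip (List.replicate m.toNat (1 : Int)))
  let dislike2 : PySem.Dict Int Int := PySem.Dict.ofList (dislike.zip (List.replicate m.toNat (-1 : Int)))
  let weights := like2.update dislike2.items
  numbers.foldl (fun total number => if weights.contains number then total + weights.getD number 0 else total) 0

-- ===== PORT B =====
def solve_alt (numbers : List Int) (m : Int) (like : List Int) (dislike : List Int) : Int :=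
  let counts : PySem.Dict Int Int := PySem.Dict.counter numbers
  let likes : PySem.Set Int := PySem.Set.ofList ((like.zip (PySem.List.pyRange 0 m 1)).map Prod.fst)
  let dislikes : PySem.Set Int := PySem.Set.ofList ((dislike.zip (PySem.List.pyRange 0 m 1)).map Prod.fst)
  let total := dislikes.foldl (fun t x => t - counts.getD x 0) 0
  likes.foldl (fun t x => if dislikes.contains x then t else t + counts.getD x 0) total

-- ===== PRECONDITION & SPEC =====
def Spec_solve (numbers : List Int) (m : Int) (like : List Int) (dislike : List Int) (out : Int) : Prop := out = solve_alt numbers m like dislike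
instance (numbers : List Int) (m : Int) (like : List Int) (dislike : List Int) (out : Int) : Decidable (Spec_solve numbers m like dislike out) := by unfold Spec_solve; infer_instance

-- ===== CLAIM (what is proved, stated in full; the proofs are below) =====
def Claim_equal_solve : Prop := ∀ (numbers : List Int) (m : Int) (like : List Int) (dislike : List Int), Dom_solve numbers m like dislike → Spec_solve numbers m like dislike (solve numbers m like dislike)

-- ===== LEMMAS AND PROOFS =====

-- zip with a replicated constant is map-const on the truncated list
theorem pv_zip_replicate (xs : List Int) (k : Nat) (c : Int) :
    xs.zip (List.replicate k c) = (xs.take k).map (fun x => (x, c)) := by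
  induction xs generalizing k with
  | nil => simp
  | cons x xs ih =>
    cases k with
    | zero => simp
    | succ k => simp [List.replicate_succ, ih]

-- the keys of a zip are the first |ys| elements
theorem pv_zip_fst (xs : List Int) (ys : List Int) :
    (xs.zip ys).map Prod.fst = xs.take ys.length := by
  induction xs generalizing ys with
  | nil => simp
  | cons x xs ih =>
    cases ys with
    | nil => simp
    | cons y ys => simp [ih]

-- lookup in a dict extended by constant-valued pairs
theorem pv_get?_update_const (ps : List (Int × Int)) (c : Int) (hc : ∀ p ∈ ps, p.2 = c) :
    ∀ (d : PySem.Dict Int Int) (n : Int),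
      (d.update ps).get? n = if n ∈ ps.map Prod.fst then some c else d.get? n := by
  induction ps with
  | nil => intro d n; simp [PySem.Dict.update]
  | cons p ps ih =>
    intro d n
    have hp : p.2 = c := hc p (by simp)
    have hps : ∀ q ∈ ps, q.2 = c := fun q hq => hc q (by simp [hq])
    have : (d.update (p :: ps)) = ((d.insert p.1 p.2).update ps) := rfl
    rw [this, ih hps, PySem.Dict.get?_insert]
    by_cases h1 : n ∈ ps.map Prod.fst <;> by_cases h2 : n = p.1 <;>
      simp [h1, h2, hp]

theorem solve_spec_aux_sum_ite (l : List Int) (hl : l.Nodup) (n : Int) (f : Int → Int) :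
    (l.map (fun x => if x = n then f x else 0)).sum = if n ∈ l then f n else 0 := by
  induction l with
  | nil => simp
  | cons a l ih =>
    have hnd := hl
    simp only [List.nodup_cons] at hnd
    by_cases h : a = n
    · subst h
      simp [List.map_cons, ih hnd.2, hnd.1]
    · have : (n ∈ a :: l) ↔ n ∈ l := by
        constructor
        · intro hm; rcases List.mem_cons.1 hm with h' | h'
          · exact absurd h'.symm h
          · exact h'
        · intro hm; exact List.mem_cons_of_mem _ hm
      simp [List.map_cons, ih hnd.2, h, this]

-- the central counting identity: a weight-sum over `ns` equals a count-sum over the key lists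
theorem pv_main (L D : List Int) (hL : L.Nodup) (hD : D.Nodup) (ns : List Int) :
    (ns.map (fun n => if n ∈ D then (-1 : Int) else if n ∈ L then 1 else 0)).sum
      = (D.map (fun x => -((ns.count x : Int)))).sum
        + (L.map (fun x => if x ∈ D then 0 else (ns.count x : Int))).sum := by
  induction ns with
  | nil => simp
  | cons n ns ih =>
    have hcnt : ∀ x : Int, (((n :: ns).count x : Int)) = (ns.count x : Int) + (if x = n then 1 else 0) := by
      intro x
      rw [List.count_cons]
      push_cast
      by_cases h : x = n
      · subst h; simp
      · have hb : (n == x) = false := by simp [Ne.symm h]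
        simp [hb, h]
    have hDsum : (D.map (fun x => -(((n :: ns).count x : Int)))).sum
        = (D.map (fun x => -((ns.count x : Int)))).sum + (if n ∈ D then (-1 : Int) else 0) := by
      have : (D.map (fun x => -(((n :: ns).count x : Int))))
          = D.map (fun x => -((ns.count x : Int)) + (if x = n then (-1 : Int) else 0)) := by
        apply List.map_congr_left; intro x _
        rw [hcnt x]
        by_cases h : x = n
        · simp [h]; ring
        · simp [h]
      rw [this, List.sum_map_add, solve_spec_aux_sum_ite D hD n (fun _ => (-1 : Int))]
    have hLsum : (L.map (fun x => if x ∈ D then 0 else (((n :: ns).count x : Int)))).sum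
        = (L.map (fun x => if x ∈ D then 0 else ((ns.count x : Int)))).sum
          + (if n ∈ L then (if n ∈ D then 0 else (1 : Int)) else 0) := by
      have : (L.map (fun x => if x ∈ D then 0 else (((n :: ns).count x : Int))))
          = L.map (fun x => (if x ∈ D then 0 else ((ns.count x : Int)))
              + (if x = n then (if x ∈ D then 0 else (1 : Int)) else 0)) := by
        apply List.map_congr_left; intro x _
        rw [hcnt x]
        by_cases h2 : x = n
        · subst h2
          by_cases h1 : x ∈ D <;> simp [h1]
        · by_cases h1 : x ∈ D <;> simp [h1, h2]
      rw [this, List.sum_map_add,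
        solve_spec_aux_sum_ite L hL n (fun x => if x ∈ D then 0 else (1 : Int))]
    rw [List.map_cons, List.sum_cons, ih, hDsum, hLsum]
    by_cases h1 : n ∈ D <;> by_cases h2 : n ∈ L <;> simp [h1, h2] <;> ring

theorem solve_spec : Claim_equal_solve := by
  intro numbers m like dislike _
  unfold Spec_solve solve solve_alt
  simp only []
  -- abbreviations for the truncated key lists
  have hz1 : like.zip (List.replicate m.toNat (1 : Int))
      = (like.take m.toNat).map (fun x => (x, (1 : Int))) := pv_zip_replicate _ _ _
  have hz2 : dislike.zip (List.replicate m.toNat (-1 : Int))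
      = (dislike.take m.toNat).map (fun x => (x, (-1 : Int))) := pv_zip_replicate _ _ _
  have hkeysB : ∀ xs : List Int,
      (xs.zip (PySem.List.pyRange 0 m 1)).map Prod.fst = xs.take m.toNat := by
    intro xs
    rw [pv_zip_fst, PySem.List.length_pyRange_one]
    norm_num
  set Lk := like.take m.toNat with hLkdef
  set Dk := dislike.take m.toNat with hDkdef
  -- the merged weight dict, characterised
  have hlike : ∀ n : Int,
      (PySem.Dict.ofList (like.zip (List.replicate m.toNat (1 : Int)))).get? n
        = if n ∈ Lk then some 1 else none := by
    intro n
    rw [hz1]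
    rw [show (PySem.Dict.ofList (Lk.map (fun x => (x, (1 : Int)))))
        = PySem.Dict.empty.update (Lk.map (fun x => (x, (1 : Int)))) from rfl]
    rw [pv_get?_update_const _ 1 (by simp)]
    simp [PySem.Dict.get?_empty, List.map_map, Function.comp]
  have hdis : ∀ n : Int,
      (PySem.Dict.ofList (dislike.zip (List.replicate m.toNat (-1 : Int)))).get? n
        = if n ∈ Dk then some (-1) else none := by
    intro n
    rw [hz2]
    rw [show (PySem.Dict.ofList (Dk.map (fun x => (x, (-1 : Int)))))
        = PySem.Dict.empty.update (Dk.map (fun x => (x, (-1 : Int)))) from rfl]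
    rw [pv_get?_update_const _ (-1) (by simp)]
    simp [PySem.Dict.get?_empty, List.map_map, Function.comp]
  set dis2 := PySem.Dict.ofList (dislike.zip (List.replicate m.toNat (-1 : Int))) with hdis2def
  have hnodup : dis2.keys.Nodup :=
    PySem.Dict.nodup_keys_update PySem.Dict.empty _ PySem.Dict.nodup_keys_empty
  have hkeysfst : dis2.items.map Prod.fst = dis2.keys := rfl
  have hdisKeys : ∀ n : Int, n ∈ dis2.items.map Prod.fst ↔ n ∈ Dk := by
    intro n
    rw [hkeysfst]
    constructor
    · intro h
      by_contra hn
      have := (PySem.Dict.get?_eq_none_iff_not_mem_keys dis2 n).1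
        (by rw [hdis n]; simp [hn])
      exact this h
    · intro h
      by_contra hn
      have := (PySem.Dict.get?_eq_none_iff_not_mem_keys dis2 n).2 hn
      rw [hdis n] at this
      simp [h] at this
  have hvals : ∀ p ∈ dis2.items, p.2 = (-1 : Int) := by
    intro p hp
    have h1 := PySem.Dict.get?_of_mem_items dis2 hp hnodup
    have h2 : p.1 ∈ Dk := (hdisKeys p.1).1 (by
      rw [hkeysfst]; exact PySem.Dict.mem_keys_of_mem_items dis2 hp)
    rw [hdis p.1, if_pos h2] at h1
    exact (Option.some_inj.1 h1).symm
  have hweights : ∀ n : Int,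
      ((PySem.Dict.ofList (like.zip (List.replicate m.toNat (1 : Int)))).update dis2.items).get? n
        = if n ∈ Dk then some (-1) else if n ∈ Lk then some 1 else none := by
    intro n
    rw [pv_get?_update_const dis2.items (-1) hvals _ n, hlike n]
    by_cases hd : n ∈ Dk
    · rw [if_pos ((hdisKeys n).2 hd), if_pos hd]
    · rw [if_neg (fun h => hd ((hdisKeys n).1 h)), if_neg hd]
  -- A's scan of `numbers` is a weight-sum
  have hA : List.foldl (fun total number =>
        if ((PySem.Dict.ofList (like.zip (List.replicate m.toNat (1 : Int)))).update dis2.items).contains number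
        then total + ((PySem.Dict.ofList (like.zip (List.replicate m.toNat (1 : Int)))).update dis2.items).getD number 0
        else total) 0 numbers
      = 0 + (numbers.map (fun n => if n ∈ Dk then (-1 : Int) else if n ∈ Lk then 1 else 0)).sum := by
    rw [PySem.List.foldl_congr_mem' numbers _
      (fun acc x => acc + (if x ∈ Dk then (-1 : Int) else if x ∈ Lk then 1 else 0)) 0 ?_]
    · exact PySem.List.foldl_add numbers _ 0
    · intro x _ acc
      rw [PySem.Dict.contains_eq_isSome_get?, PySem.Dict.getD_eq_get?_getD, hweights x]
      by_cases h1 : x ∈ Dk <;> by_cases h2 : x ∈ Lk <;> simp [h1, h2]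
  -- B's two key scans are count-sums
  have hB1 : List.foldl (fun t x => t - (PySem.Dict.counter numbers).getD x 0) 0
        (PySem.Set.ofList Dk)
      = 0 + ((PySem.Set.ofList Dk).map (fun x => -((numbers.count x : Int)))).sum := by
    rw [PySem.List.foldl_congr_mem' _ _
      (fun acc x => acc + (-((numbers.count x : Int)))) 0 ?_]
    · exact PySem.List.foldl_add _ _ 0
    · intro x _ acc
      rw [PySem.Dict.getD_counter]
      ring
  have hB2 : ∀ t0 : Int, List.foldl (fun t x =>
        if (PySem.Set.ofList Dk).contains x then t else t + (PySem.Dict.counter numbers).getD x 0) t0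
        (PySem.Set.ofList Lk)
      = t0 + ((PySem.Set.ofList Lk).map
          (fun x => if x ∈ Dk then 0 else (numbers.count x : Int))).sum := by
    intro t0
    rw [PySem.List.foldl_congr_mem' _ _
      (fun acc x => acc + (if x ∈ Dk then 0 else (numbers.count x : Int))) t0 ?_]
    · exact PySem.List.foldl_add _ _ t0
    · intro x _ acc
      rw [PySem.Dict.getD_counter]
      by_cases h : x ∈ Dk
      · rw [if_pos (by rw [PySem.Set.contains_iff, PySem.Set.mem_ofList]; exact h)]
        simp [h]
      · rw [if_neg (by rw [PySem.Set.contains_iff, PySem.Set.mem_ofList]; exact h)]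
        simp [h]
  have hmain := pv_main (PySem.Set.ofList Lk) (PySem.Set.ofList Dk)
    (PySem.Set.nodup_ofList Lk) (PySem.Set.nodup_ofList Dk) numbers
  simp only [PySem.Set.mem_ofList] at hmain
  rw [hkeysB like, hkeysB dislike, hA, hB1, hB2, hmain]
  ring
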